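-- pv_equiv track=rewrite | github.com/xohyun/AnomalyDetection_in_TS | utils/utils.py | find_bundle
-- ===== SOURCE A (Python) =====
-- def find_bundle(queue):
--     packet = []
--     tmp = []
--     v = queue.pop(0)
--     tmp.append(v)
--
--     while(len(queue)>0):
--         vv = queue.pop(0)
--         if v+1 == vv:
--             tmp.append(vv)
--             v = vv
--         else:
--             packet.append(tmp)
--             tmp = []
--             tmp.append(vv)
--             v = vv
--
--     packet.append(tmp)
--     return packet
-- ===== SOURCE B (Python) =====
-- def find_bundle(queue):
--     # Drain the argument by popping (same observable mutation as the original),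
--     # then build the grouping back-to-front in one reversed pass.
--     values = []
--     while queue:
--         values.append(queue.pop(0))
--     packet = []
--     for v in reversed(values):
--         if packet and packet[0][0] == v + 1:
--             packet[0] = [v] + packet[0]
--         else:
--             packet.insert(0, [v])
--     return packet
-- ===== Notes on version B (the rewrite author's own statement) =====
-- stated objective: alternative
-- what changed: Replaces the forward while-pop loop carrying (current value, open group, finished packets) state by a single backward pass that prepends each value to the front group or opens a new front group, so no open-group/last-value state is threaded.
import Mathlib
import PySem

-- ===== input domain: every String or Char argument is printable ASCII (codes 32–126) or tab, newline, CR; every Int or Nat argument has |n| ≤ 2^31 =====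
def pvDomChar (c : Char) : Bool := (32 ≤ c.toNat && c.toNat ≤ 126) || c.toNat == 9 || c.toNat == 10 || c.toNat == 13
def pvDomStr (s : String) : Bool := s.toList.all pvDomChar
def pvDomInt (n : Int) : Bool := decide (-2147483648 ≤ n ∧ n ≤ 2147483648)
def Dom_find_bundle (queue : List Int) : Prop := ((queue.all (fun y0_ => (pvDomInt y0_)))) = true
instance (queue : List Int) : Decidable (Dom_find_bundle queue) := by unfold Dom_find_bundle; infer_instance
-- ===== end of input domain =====

-- B replaces A's forward while-pop loop (threading current value / open group / finished
-- packets) with a single backward pass that prepends into the front group; same cost,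
-- same return value on non-empty input, same draining mutation of the argument.


-- ===== PORT A =====
-- while-loop of A: state is (v, tmp, packet); queue is consumed front-first by pop(0)
def findBundleLoop : List Int → Int → List Int → List (List Int) → List (List Int)
  | [], _, tmp, packet => packet ++ [tmp]
  | vv :: rest, v, tmp, packet =>
    if v + 1 = vv then findBundleLoop rest vv (tmp ++ [vv]) packet
    else findBundleLoop rest vv [vv] (packet ++ [tmp])

def find_bundle (queue : List Int) : List (List Int) :=
  match queue with
  | [] => []          -- Python raises IndexError here (pop from empty list); excluded by Pre_
  | v :: rest => findBundleLoop rest v [v] []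

-- ===== PORT B =====
-- B drains the list then folds backwards: prepend v into the front group or open a new one.
def find_bundle_alt (queue : List Int) : List (List Int) :=
  queue.foldr
    (fun v packet =>
      match packet with
      | g :: gs => if g.headD 0 = v + 1 then (v :: g) :: gs else [v] :: g :: gs
      | [] => [[v]])
    []

-- ===== PRECONDITION & SPEC =====
-- A raises IndexError on the empty list (initial queue.pop(0)); that is the only exclusion.
def Pre_find_bundle (queue : List Int) : Prop := queue ≠ []
instance (queue : List Int) : Decidable (Pre_find_bundle queue) := by unfold Pre_find_bundle; infer_instance
def pvWitness_find_bundle : List Int := ([1, 2, 4])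

def Spec_find_bundle (queue : List Int) (out : List (List Int)) : Prop := out = find_bundle_alt queue
instance (queue : List Int) (out : List (List Int)) : Decidable (Spec_find_bundle queue out) := by unfold Spec_find_bundle; infer_instance

-- ===== CLAIM (what is proved, stated in full; the proofs are below) =====
def Claim_equal_find_bundle : Prop := ∀ (queue : List Int), Dom_find_bundle queue → Pre_find_bundle queue → Spec_find_bundle queue (find_bundle queue)

-- ===== LEMMAS AND PROOFS =====

-- B on a non-empty list yields a first group starting with the head value.
theorem alt_shape : ∀ (queue : List Int) (v : Int),
    ∃ t gs, find_bundle_alt (v :: queue) = (v :: t) :: gs := by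
  intro queue
  induction queue with
  | nil => intro v; exact ⟨[], [], rfl⟩
  | cons w rest ih =>
    intro v
    obtain ⟨t, gs, h⟩ := ih w
    simp only [find_bundle_alt, List.foldr] at h ⊢
    rw [h]
    by_cases hc : w = v + 1
    · exact ⟨w :: t, gs, by simp [hc]⟩
    · exact ⟨[], (w :: t) :: gs, by simp [hc]⟩

-- A's loop invariant: tmp is the open group (ending in v), packet the finished groups;
-- the loop extends the open group by the tail of B's first group and appends the rest.
theorem loop_eq : ∀ (queue : List Int) (v : Int) (tmp : List Int) (packet : List (List Int))
    (t : List Int) (gs : List (List Int)),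
    find_bundle_alt (v :: queue) = (v :: t) :: gs →
    findBundleLoop queue v tmp packet = packet ++ (tmp ++ t) :: gs := by
  intro queue
  induction queue with
  | nil =>
    intro v tmp packet t gs h
    simp only [find_bundle_alt, List.foldr] at h
    cases h
    simp [findBundleLoop]
  | cons vv rest ih =>
    intro v tmp packet t gs h
    obtain ⟨t', gs', h'⟩ := alt_shape rest vv
    have hstep : find_bundle_alt (v :: vv :: rest)
        = if vv = v + 1 then (v :: vv :: t') :: gs' else [v] :: (vv :: t') :: gs' := by
      simp only [find_bundle_alt, List.foldr] at h' ⊢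
      rw [h']
      by_cases hc : vv = v + 1 <;> simp [hc]
    rw [hstep] at h
    by_cases hc : vv = v + 1
    · simp only [hc] at h
      obtain ⟨h1, h2⟩ : (v :: t = v :: vv :: t') ∧ gs = gs' := by
        constructor <;> injection h with ha hb <;> simp_all
      have ht : t = vv :: t' := by injection h1
      have : findBundleLoop rest vv (tmp ++ [vv]) packet = packet ++ ((tmp ++ [vv]) ++ t') :: gs' := ih vv (tmp ++ [vv]) packet t' gs' h'
      rw [findBundleLoop, if_pos (by omega : v + 1 = vv), this, ht, h2]
      simp
    · simp only [if_neg hc] at h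
      injection h with ha hb
      have ht : t = [] := by injection ha with _ h2; exact h2.symm
      have : findBundleLoop rest vv [vv] (packet ++ [tmp]) = (packet ++ [tmp]) ++ ([vv] ++ t') :: gs' := ih vv [vv] (packet ++ [tmp]) t' gs' h'
      rw [findBundleLoop, if_neg (by omega : ¬ v + 1 = vv), this, ht, ← hb]
      simp

-- ===== VERDICT (by name: the statement is the Claim_ definition above) =====
theorem find_bundle_spec : Claim_equal_find_bundle := by
  intro queue _ hpre
  unfold Spec_find_bundle
  match queue with
  | [] => exact absurd rfl hpre
  | v :: rest =>
    obtain ⟨t, gs, h⟩ := alt_shape rest v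
    rw [h, find_bundle, loop_eq rest v [v] [] t gs h]
    simp
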